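-- pv_equiv track=rewrite | github.com/sehalu/ai_shenanigans | dragon_eggs/egg_drop_solver.py | calculate_optimal_first_drops
-- ===== SOURCE A (Python) =====
-- from math import ceil, sqrt
-- from typing import List, Tuple
--
-- def calculate_optimal_drops(total_floors: int) -> int:
--     """
--     Calculate the minimum number of drops needed for a given number of floors.
--
--     Uses the formula: k(k+1)/2 ≥ n where k is drops needed and n is number of floors.
--
--     Args:
--         total_floors: Number of floors in the tower
--
--     Returns:
--         Minimum number of drops needed
--     """
--     # Solve quadratic equation: x^2 + x - 2n = 0
--     return ceil((-1 + sqrt(1 + 8 * total_floors)) / 2)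
--
-- def calculate_optimal_first_drops(total_floors: int) -> List[int]:
--     """
--     Calculate the optimal floors to drop the first egg.
--
--     The step size is calculated to ensure optimal number of drops
--     for any building height.
--
--     Args:
--         total_floors: Total number of floors in the tower
--
--     Returns:
--         List of floor numbers to test with first egg
--
--     Time complexity: O(k) where k is optimal number of drops
--     Space complexity: O(k) for storing drop points
--     """
--     # Calculate optimal number of drops needed
--     optimal_drops = calculate_optimal_drops(total_floors)
--
--     drops = []
--     current_floor = 0
--     step = optimal_drops
--
--     # Pre-allocate list for better memory efficiency
--     drops = []
--     drops.append(0)  # Add sentinel value for easier calculations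
--
--     while step > 0 and current_floor + step <= total_floors:
--         current_floor += step
--         drops.append(current_floor)
--         step -= 1
--
--     return drops[1:]  # Remove sentinel value
-- ===== SOURCE B (Python) =====
-- from math import isqrt
--
-- def calculate_optimal_first_drops(total_floors):
--     # Exact integer ceiling square root of 8n+1 gives the optimal drop count k,
--     # then each drop point is produced directly by the closed form
--     # p_i = i*k - i*(i-1)//2 (no running accumulator).
--     c = isqrt(8 * total_floors + 1)
--     if c * c < 8 * total_floors + 1:
--         c += 1
--     k = c // 2
--     return [p for p in ((i * k - i * (i - 1) // 2) for i in range(1, k + 1))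
--             if p <= total_floors]
-- ===== Notes on version B (the rewrite author's own statement) =====
-- stated objective: alternative
-- what changed: Replaces the while-loop that maintains a running current floor and decreasing step with exact integer arithmetic: k from an integer ceiling-sqrt instead of float sqrt/ceil, and each drop point from the closed form i*k - i*(i-1)//2 in a comprehension.
import Mathlib
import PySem

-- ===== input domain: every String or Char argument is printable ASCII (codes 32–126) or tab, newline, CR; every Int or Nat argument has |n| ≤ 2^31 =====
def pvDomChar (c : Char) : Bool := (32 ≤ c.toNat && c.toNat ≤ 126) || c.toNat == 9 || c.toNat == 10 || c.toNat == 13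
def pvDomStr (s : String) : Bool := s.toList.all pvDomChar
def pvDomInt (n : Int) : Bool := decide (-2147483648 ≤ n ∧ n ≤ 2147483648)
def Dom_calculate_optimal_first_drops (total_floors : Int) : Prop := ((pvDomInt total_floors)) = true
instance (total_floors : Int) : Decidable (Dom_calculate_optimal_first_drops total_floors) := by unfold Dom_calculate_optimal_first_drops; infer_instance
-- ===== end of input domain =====

-- B replaces A's running-accumulator while loop by exact integer ceiling-sqrt
-- arithmetic and the closed form i*k - i*(i-1)//2 for each drop point (same cost).

-- ===== PORT A =====
-- Hand port of ceil((-1 + sqrt(1 + 8*n)) / 2): the double-precision sqrt is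
-- correctly rounded, and for 0 ≤ n ≤ 2^31 the argument 1+8n ≤ 2^35 ≪ 2^53 is
-- exact; the quotient only crosses an integer when 1+8n is a perfect square,
-- where sqrt is exact, so the float expression equals ⌈√(1+8n)⌉ // 2 exactly.
def calculate_optimal_drops (total_floors : Int) : Int :=
  let m := 1 + 8 * total_floors
  let r : Int := (Nat.sqrt m.toNat : Int)
  let c := if r * r < m then r + 1 else r
  PySem.Int.floordiv c 2

-- the while loop: state = (step, current_floor); fuel = step (it strictly decreases)
def pvLoopA (total : Int) : Nat → Int → List Int
  | 0, _ => []
  | s + 1, current =>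
      if current + ((s : Int) + 1) ≤ total then
        (current + ((s : Int) + 1)) :: pvLoopA total s (current + ((s : Int) + 1))
      else []

def calculate_optimal_first_drops (total_floors : Int) : List Int :=
  let optimal_drops := calculate_optimal_drops total_floors
  let drops : List Int := [0]                    -- sentinel
  let drops := drops ++ pvLoopA total_floors optimal_drops.toNat 0
  PySem.List.slice drops (some 1) none           -- drops[1:]

-- ===== PORT B =====
-- Source B: math.isqrt → Nat.sqrt on the nonnegative argument (ValueError on
-- negatives is excluded by Pre_), then a filtered comprehension of closed forms.
def calculate_optimal_first_drops_alt (total_floors : Int) : List Int :=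
  let c0 : Int := (Nat.sqrt (8 * total_floors + 1).toNat : Int)
  let c := if c0 * c0 < 8 * total_floors + 1 then c0 + 1 else c0
  let k := PySem.Int.floordiv c 2
  ((PySem.List.pyRange 1 (k + 1) 1).map
      (fun i => i * k - PySem.Int.floordiv (i * (i - 1)) 2)).filter
    (fun p => decide (p ≤ total_floors))

-- ===== PRECONDITION & SPEC =====
-- Pre_ excludes negative total_floors, on which A raises ValueError (math
-- domain error in sqrt); B raises ValueError there too (isqrt of a negative).
def Pre_calculate_optimal_first_drops (total_floors : Int) : Prop := 0 ≤ total_floors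
instance (total_floors : Int) : Decidable (Pre_calculate_optimal_first_drops total_floors) := by
  unfold Pre_calculate_optimal_first_drops; infer_instance
def pvWitness_calculate_optimal_first_drops : Int := (10)

def Spec_calculate_optimal_first_drops (total_floors : Int) (out : List Int) : Prop := out = calculate_optimal_first_drops_alt total_floors
instance (total_floors : Int) (out : List Int) : Decidable (Spec_calculate_optimal_first_drops total_floors out) := by unfold Spec_calculate_optimal_first_drops; infer_instance

-- ===== CLAIM (what is proved, stated in full; the proofs are below) =====
def Claim_equal_calculate_optimal_first_drops : Prop := ∀ (total_floors : Int), Dom_calculate_optimal_first_drops total_floors → Pre_calculate_optimal_first_drops total_floors → Spec_calculate_optimal_first_drops total_floors (calculate_optimal_first_drops total_floors)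

-- ===== LEMMAS AND PROOFS =====

-- the closed-form drop point
def pvF (k i : Int) : Int := i * k - PySem.Int.floordiv (i * (i - 1)) 2

lemma pv_half_mul (i : Int) : 2 * PySem.Int.floordiv (i * (i - 1)) 2 = i * (i - 1) := by
  have he : (2 : Int) ∣ i * (i - 1) := by
    rcases Int.even_mul_succ_self (i - 1) with ⟨m, hm⟩
    exact ⟨m, by linarith⟩
  rw [PySem.Int.floordiv_eq_ediv_of_pos (show (0:Int) < 2 by norm_num)]
  exact Int.mul_ediv_cancel' he

lemma pvF_succ (k j : Int) : pvF k (j + 1) = pvF k j + (k - j) := by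
  have h1 := pv_half_mul j
  have h2 := pv_half_mul (j + 1)
  have h : 2 * pvF k (j + 1) = 2 * (pvF k j + (k - j)) := by
    unfold pvF; linear_combination h1 - h2
  omega

lemma pvF_mono (k i j : Int) (hij : i ≤ j) (hjk : j ≤ k) : pvF k i ≤ pvF k j := by
  have h1 := pv_half_mul i
  have h2 := pv_half_mul j
  have key : 0 ≤ (j - i) * (2 * k + 1 - j - i) :=
    mul_nonneg (by omega) (by omega)
  have hdiff : 2 * (pvF k j - pvF k i) = (j - i) * (2 * k + 1 - j - i) := by
    unfold pvF; linear_combination h1 - h2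
  omega

lemma pvF_zero (k : Int) : pvF k 0 = 0 := by
  unfold pvF
  simp [PySem.Int.floordiv]

lemma pv_loop_eq (n k : Int) :
    ∀ (s : Nat) (j : Int), 0 ≤ j → j + (s : Int) = k →
      pvLoopA n s (pvF k j) =
        ((PySem.List.pyRange (j + 1) (k + 1) 1).map (pvF k)).filter
          (fun p => decide (p ≤ n)) := by
  intro s
  induction s with
  | zero =>
      intro j hj hk
      have : (PySem.List.pyRange (j + 1) (k + 1) 1) = [] := by
        rw [PySem.List.pyRange_one]
        simp
        omega
      simp [pvLoopA, this]
  | succ s ih =>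
      intro j hj hk
      have hjk : j < k := by omega
      have hcons : PySem.List.pyRange (j + 1) (k + 1) 1
          = (j + 1) :: PySem.List.pyRange (j + 1 + 1) (k + 1) 1 :=
        PySem.List.pyRange_one_cons (by omega)
      have hstep : pvF k j + ((s : Int) + 1) = pvF k (j + 1) := by
        rw [pvF_succ]; omega
      rw [hcons]
      simp only [List.map_cons, List.filter_cons]
      by_cases hle : pvF k (j + 1) ≤ n
      · have := ih (j + 1) (by omega) (by omega)
        simp only [pvLoopA, hstep, hle, decide_true]
        simp [this]
      · have hnil :
            (((PySem.List.pyRange (j + 1 + 1) (k + 1) 1).map (pvF k)).filter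
              (fun p => decide (p ≤ n))) = [] := by
          rw [List.filter_eq_nil_iff]
          intro p hp
          rcases List.mem_map.mp hp with ⟨i, hi, rfl⟩
          rcases (PySem.List.mem_pyRange_one).mp hi with ⟨hi1, hi2⟩
          have : pvF k (j + 1) ≤ pvF k i := pvF_mono k (j + 1) i (by omega) (by omega)
          simp only [decide_eq_true_eq]
          omega
        simp only [pvLoopA, hstep, hle, decide_false]
        simp [hnil]

-- ===== VERDICT (by name: the statement is the Claim_ definition above) =====
theorem calculate_optimal_first_drops_spec : Claim_equal_calculate_optimal_first_drops := by
  intro n _ hpre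
  unfold Spec_calculate_optimal_first_drops
  unfold calculate_optimal_first_drops calculate_optimal_first_drops_alt
  unfold calculate_optimal_drops
  have hm : 1 + 8 * n = 8 * n + 1 := by ring
  rw [hm]
  set r : Int := (Nat.sqrt (8 * n + 1).toNat : Int) with hr
  set c : Int := if r * r < 8 * n + 1 then r + 1 else r with hc
  set k : Int := PySem.Int.floordiv c 2 with hk
  have hc0 : 0 ≤ c := by
    have : (0 : Int) ≤ r := by positivity
    rw [hc]; split <;> omega
  have hk0 : 0 ≤ k := by
    rw [hk, PySem.Int.floordiv_eq_ediv_of_pos (show (0:Int) < 2 by norm_num)]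
    exact Int.ediv_nonneg hc0 (by norm_num)
  have hfuel : (0 : Int) + ((k.toNat : Nat) : Int) = k := by omega
  have hloop := pv_loop_eq n k k.toNat 0 le_rfl (by omega)
  rw [pvF_zero] at hloop
  simp only [List.singleton_append]
  rw [PySem.List.slice_from_one, List.tail_cons]
  exact hloop
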